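-- pv_equiv track=rewrite | github.com/francislabountyjr/stereo2spatial | scripts/data/delete_dataset_samples.py | path_has_subpath
-- ===== SOURCE A (Python) =====
-- def path_has_subpath(source_parts: tuple[str, ...], pattern_parts: tuple[str, ...]) -> bool:
--     pattern_len = len(pattern_parts)
--     if pattern_len == 0 or pattern_len > len(source_parts):
--         return False
--     max_start = len(source_parts) - pattern_len
--     for index in range(max_start + 1):
--         if source_parts[index : index + pattern_len] == pattern_parts:
--             return True
--     return False
-- ===== SOURCE B (Python) =====
-- def path_has_subpath(source_parts: tuple[str, ...], pattern_parts: tuple[str, ...]) -> bool: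
--     # Single left-to-right pass maintaining the frontier of partial-match lengths
--     # (NFA simulation of the pattern matcher); no slicing, no restarting.
--     m = len(pattern_parts)
--     if m == 0:
--         return False
--     active = []  # j in active  <=>  the last j parts seen equal pattern_parts[:j], 1 <= j < m
--     for part in source_parts:
--         next_active = []
--         for j in active:
--             if pattern_parts[j] == part:
--                 if j + 1 == m:
--                     return True
--                 next_active.append(j + 1)
--         if pattern_parts[0] == part:
--             if m == 1:
--                 return True
--             next_active.append(1)
--         active = next_active
--     return False
-- ===== Notes on version B (the rewrite author's own statement) =====
-- stated objective: alternative
-- what changed: Replaces the restart-at-every-index slice-and-compare scan with a single left-to-right pass that maintains the set of partial-match lengths (an NFA simulation of the matcher), so no window slicing or re-scanning of source elements from scratch is done.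
import Mathlib
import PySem

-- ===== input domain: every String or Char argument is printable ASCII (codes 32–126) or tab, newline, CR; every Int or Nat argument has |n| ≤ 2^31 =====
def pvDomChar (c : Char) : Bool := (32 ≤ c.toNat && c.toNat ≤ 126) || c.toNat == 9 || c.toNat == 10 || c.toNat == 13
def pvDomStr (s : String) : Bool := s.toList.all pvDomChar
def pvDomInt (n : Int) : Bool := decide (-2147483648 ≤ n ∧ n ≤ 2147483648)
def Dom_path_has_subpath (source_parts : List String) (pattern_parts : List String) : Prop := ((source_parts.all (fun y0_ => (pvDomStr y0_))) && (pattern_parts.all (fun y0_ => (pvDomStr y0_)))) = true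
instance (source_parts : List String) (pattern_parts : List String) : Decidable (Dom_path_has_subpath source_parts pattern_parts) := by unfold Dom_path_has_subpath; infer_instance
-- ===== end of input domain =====

-- B replaces A's restart-at-every-index slice-and-compare scan by a single pass that
-- maintains the set of partial-match lengths (an NFA simulation); objective: alternative.

-- ===== PORT A =====
-- the 'for index in range(max_start + 1): if source[index:index+m] == pattern: return True' loop
def pvLoopA (source_parts pattern_parts : List String) (patternLen : Int) : List Int → Bool
  | [] => false
  | i :: rest =>
      if PySem.List.slice source_parts (some i) (some (i + patternLen)) = pattern_parts then true
      else pvLoopA source_parts pattern_parts patternLen rest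

def path_has_subpath (source_parts : List String) (pattern_parts : List String) : Bool :=
  let patternLen : Int := pattern_parts.length
  if patternLen = 0 ∨ (source_parts.length : Int) < patternLen then false
  else
    let maxStart : Int := (source_parts.length : Int) - patternLen
    pvLoopA source_parts pattern_parts patternLen (PySem.List.pyRange 0 (maxStart + 1) 1)

-- ===== PORT B =====
-- inner 'for j in active' loop; 'none' models the early 'return True'
def pvInnerB (pattern_parts : List String) (m : Nat) (part : String) :
    List Nat → List Nat → Option (List Nat)
  | [], acc => some acc
  | j :: rest, acc =>
      if pattern_parts.getD j "" = part then
        if j + 1 = m then none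
        else pvInnerB pattern_parts m part rest (acc ++ [j + 1])
      else pvInnerB pattern_parts m part rest acc

-- outer 'for part in source_parts' loop carrying the active frontier
def pvOuterB (pattern_parts : List String) (m : Nat) : List String → List Nat → Bool
  | [], _ => false
  | part :: src, active =>
      match pvInnerB pattern_parts m part active [] with
      | none => true
      | some nextActive =>
          if pattern_parts.getD 0 "" = part then
            if m = 1 then true
            else pvOuterB pattern_parts m src (nextActive ++ [1])
          else pvOuterB pattern_parts m src nextActive

def path_has_subpath_alt (source_parts : List String) (pattern_parts : List String) : Bool :=
  let m := pattern_parts.length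
  if m = 0 then false
  else pvOuterB pattern_parts m source_parts []

-- ===== PRECONDITION & SPEC =====
def Spec_path_has_subpath (source_parts : List String) (pattern_parts : List String) (out : Bool) : Prop := out = path_has_subpath_alt source_parts pattern_parts
instance (source_parts : List String) (pattern_parts : List String) (out : Bool) : Decidable (Spec_path_has_subpath source_parts pattern_parts out) := by unfold Spec_path_has_subpath; infer_instance

-- ===== CLAIM (what is proved, stated in full; the proofs are below) =====
def Claim_equal_path_has_subpath : Prop := ∀ (source_parts : List String) (pattern_parts : List String), Dom_path_has_subpath source_parts pattern_parts → Spec_path_has_subpath source_parts pattern_parts (path_has_subpath source_parts pattern_parts)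

-- ===== LEMMAS AND PROOFS =====

theorem loopA_iff (src pat : List String) (m : Int) (L : List Int) :
    pvLoopA src pat m L = true ↔
      ∃ i ∈ L, PySem.List.slice src (some i) (some (i + m)) = pat := by
  induction L with
  | nil => simp [pvLoopA]
  | cons i rest ih =>
      simp only [pvLoopA]
      split_ifs with h
      · simp [h]
      · simp [ih, h]

theorem innerB_eq (pat : List String) (m : Nat) (part : String) (act acc : List Nat) :
    pvInnerB pat m part act acc =
      if act.any (fun j => pat.getD j "" == part && j + 1 == m) then none
      else some (acc ++ (act.filter (fun j => pat.getD j "" == part)).map (· + 1)) := by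
  induction act generalizing acc with
  | nil => simp [pvInnerB]
  | cons j rest ih =>
      by_cases h1 : pat.getD j "" = part
      · have hb : (pat.getD j "" == part) = true := beq_iff_eq.mpr h1
        by_cases h2 : j + 1 = m
        · have hb2 : (j + 1 == m) = true := beq_iff_eq.mpr h2
          simp only [pvInnerB, if_pos h1, if_pos h2, List.any_cons, List.filter_cons, hb, hb2,
            Bool.true_and, Bool.true_or]
          simp
        · have hb2 : (j + 1 == m) = false := by simp [h2]
          simp only [pvInnerB, if_pos h1, if_neg h2, List.any_cons, List.filter_cons, hb, hb2,
            Bool.true_and, Bool.false_or]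
          simp [ih]
      · have hb : (pat.getD j "" == part) = false := beq_eq_false_iff_ne.mpr h1
        simp only [pvInnerB, if_neg h1, List.any_cons, List.filter_cons, hb,
          Bool.false_and, Bool.false_or]
        exact ih acc

theorem suffix_concat_iff {α : Type} (l p : List α) (a b : α) :
    l ++ [a] <:+ p ++ [b] ↔ a = b ∧ l <:+ p := by
  rw [← List.reverse_prefix]
  simp only [List.reverse_append, List.reverse_singleton, List.singleton_append,
    List.cons_prefix_cons, List.reverse_prefix]

theorem take_suffix_concat (pat p : List String) (part : String) (j : Nat)
    (hj1 : 1 ≤ j) (hjm : j ≤ pat.length) :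
    (pat.take j <:+ p ++ [part] ↔ pat.take (j-1) <:+ p ∧ pat.getD (j-1) "" = part) := by
  obtain ⟨j', rfl⟩ : ∃ j', j = j' + 1 := ⟨j - 1, by omega⟩
  have hlt : j' < pat.length := by omega
  have h : pat.take (j' + 1) = pat.take j' ++ [pat.getD j' ""] := by
    rw [List.take_add_one]
    simp [List.getElem?_eq_getElem hlt]
  rw [h]
  simp only [Nat.add_sub_cancel]
  rw [suffix_concat_iff]
  tauto

theorem A_iff (src pat : List String) :
    path_has_subpath src pat = true ↔
      pat ≠ [] ∧ ∃ k : Nat, k + pat.length ≤ src.length ∧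
        (src.drop k).take pat.length = pat := by
  rw [show path_has_subpath src pat =
        (if ((pat.length : Int) = 0 ∨ (src.length : Int) < (pat.length : Int)) then false
         else pvLoopA src pat (pat.length : Int)
                (PySem.List.pyRange 0 (((src.length : Int) - (pat.length : Int)) + 1) 1)) from rfl]
  split_ifs with h0
  · refine iff_of_false (by simp) ?_
    rintro ⟨hne, k, hk, -⟩
    have hp : 0 < pat.length := List.length_pos_iff.mpr hne
    rcases h0 with h | h
    · have : pat.length = 0 := by exact_mod_cast h
      omega
    · have : src.length < pat.length := by exact_mod_cast h
      omega
  · push_neg at h0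
    obtain ⟨h1, h2⟩ := h0
    have hm1 : 1 ≤ pat.length := by
      rcases Nat.eq_zero_or_pos pat.length with h | h
      · exact absurd (by exact_mod_cast h) h1
      · exact h
    have hmn : pat.length ≤ src.length := by exact_mod_cast h2
    rw [loopA_iff]
    constructor
    · rintro ⟨i, hi, he⟩
      rw [PySem.List.mem_pyRange_one] at hi
      obtain ⟨hi0, hi1⟩ := hi
      lift i to Nat using hi0 with k
      refine ⟨List.ne_nil_of_length_pos (by omega), k, ?_, ?_⟩
      · have : (k : Int) < (src.length : Int) - (pat.length : Int) + 1 := hi1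
        omega
      · rw [PySem.List.slice_natCast_add] at he
        exact he
    · rintro ⟨hne, k, hk, he⟩
      refine ⟨(k : Int), ?_, ?_⟩
      · rw [PySem.List.mem_pyRange_one]
        constructor
        · exact Int.natCast_nonneg k
        · omega
      · rw [PySem.List.slice_natCast_add]
        exact he

theorem shift_iff (pat p : List String) (part : String) (rest : List String)
    (hnot : ¬ pat <:+ p ++ [part]) :
    (∃ i, 1 ≤ i ∧ i ≤ rest.length ∧ pat <:+ (p ++ [part]) ++ rest.take i) ↔
    (∃ i, 1 ≤ i ∧ i ≤ (part :: rest).length ∧ pat <:+ p ++ (part :: rest).take i) := by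
  constructor
  · rintro ⟨i, h1, h2, h3⟩
    refine ⟨i + 1, by omega, by simp; omega, ?_⟩
    rw [List.take_succ_cons]
    simpa [List.append_assoc] using h3
  · rintro ⟨i, h1, h2, h3⟩
    obtain ⟨i', rfl⟩ : ∃ i', i = i' + 1 := ⟨i - 1, by omega⟩
    rw [List.take_succ_cons] at h3
    rcases Nat.eq_zero_or_pos i' with rfl | hpos
    · exact absurd (by simpa using h3) hnot
    · refine ⟨i', hpos, by simp at h2; omega, ?_⟩
      simpa [List.append_assoc] using h3

theorem inv_step (pat p : List String) (part : String) (active : List Nat)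
    (hinv : ∀ j, j ∈ active ↔ 1 ≤ j ∧ j < pat.length ∧ pat.take j <:+ p)
    (hfound : ∀ j ∈ active, pat.getD j "" = part → j + 1 ≠ pat.length) :
    ∀ j', 2 ≤ j' →
      (j' ∈ (active.filter (fun j => pat.getD j "" == part)).map (· + 1) ↔
        j' < pat.length ∧ pat.take j' <:+ p ++ [part]) := by
  intro j' hj2
  obtain ⟨j, rfl⟩ : ∃ j, j' = j + 1 := ⟨j' - 1, by omega⟩
  simp only [List.mem_map, List.mem_filter, beq_iff_eq]
  constructor
  · rintro ⟨j0, ⟨hj0a, hj0g⟩, heq⟩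
    have hj0e : j0 = j := by omega
    rw [hj0e] at hj0a hj0g
    have h3 := (hinv j).mp hj0a
    have hlt : j + 1 < pat.length := lt_of_le_of_ne (by omega) (hfound j hj0a hj0g)
    refine ⟨hlt, ?_⟩
    exact (take_suffix_concat pat p part (j + 1) (by omega) (by omega)).mpr
      ⟨by simpa using h3.2.2, by simpa using hj0g⟩
  · rintro ⟨hlt, hsuf⟩
    have h := (take_suffix_concat pat p part (j + 1) (by omega) (by omega)).mp hsuf
    exact ⟨j, ⟨(hinv j).mpr ⟨by omega, by omega, by simpa using h.1⟩, by simpa using h.2⟩, rfl⟩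

theorem outerB_iff (pat : List String) (hm : 1 ≤ pat.length) (src : List String) :
    ∀ (p : List String) (active : List Nat),
      (∀ j, j ∈ active ↔ 1 ≤ j ∧ j < pat.length ∧ pat.take j <:+ p) →
      (pvOuterB pat pat.length src active = true ↔
        ∃ i, 1 ≤ i ∧ i ≤ src.length ∧ pat <:+ p ++ src.take i) := by
  induction src with
  | nil =>
      intro p active hinv
      refine iff_of_false (by simp [pvOuterB]) ?_
      rintro ⟨i, h1, h2, -⟩
      simp at h2; omega
  | cons part rest ih =>
      intro p active hinv
      cases hfound : active.any (fun j => pat.getD j "" == part && j + 1 == pat.length) with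
      | true =>
          have hin : pvInnerB pat pat.length part active [] = none := by
            rw [innerB_eq, hfound]; simp
          simp only [pvOuterB, hin]
          obtain ⟨j, hj, hgd, hjm⟩ :
              ∃ j ∈ active, pat.getD j "" = part ∧ j + 1 = pat.length := by
            simpa [List.any_eq_true, Bool.and_eq_true, beq_iff_eq] using hfound
          have hj' := (hinv j).mp hj
          have hfull : pat <:+ p ++ [part] := by
            have h := (take_suffix_concat pat p part pat.length hm le_rfl).mpr
              ⟨by rw [show pat.length - 1 = j from by omega]; exact hj'.2.2,
               by rw [show pat.length - 1 = j from by omega]; exact hgd⟩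
            rwa [List.take_length] at h
          exact iff_of_true (by trivial) ⟨1, le_refl 1, by simp, by simpa using hfull⟩
      | false =>
          have hin : pvInnerB pat pat.length part active [] =
              some ((active.filter (fun j => pat.getD j "" == part)).map (· + 1)) := by
            rw [innerB_eq, hfound]; simp
          simp only [pvOuterB, hin]
          have hfound' : ∀ j ∈ active, pat.getD j "" = part → j + 1 ≠ pat.length := by
            intro j hj hg he
            have : active.any (fun j => pat.getD j "" == part && j + 1 == pat.length) = true := by
              simp only [List.any_eq_true, Bool.and_eq_true, beq_iff_eq]
              exact ⟨j, hj, hg, he⟩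
            rw [hfound] at this; cases this
          by_cases hm1 : pat.length = 1
          · -- single-element pattern
            by_cases hp0 : pat.getD 0 "" = part
            · rw [if_pos hp0, if_pos hm1]
              have hpat : pat = [part] := by
                cases pat with
                | nil => simp at hm1
                | cons x xs =>
                    have hlen : xs.length = 0 := by
                      have h := hm1; simp only [List.length_cons] at h; omega
                    have hxs : xs = [] := List.length_eq_zero_iff.mp hlen
                    subst hxs
                    have hx : x = part := by simpa using hp0
                    rw [hx]
              exact iff_of_true (by trivial) ⟨1, le_refl 1, by simp,
                by simpa [hpat] using (List.suffix_append p [part])⟩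
            · rw [if_neg hp0]
              have hnot : ¬ pat <:+ p ++ [part] := by
                intro hfull
                have h := (take_suffix_concat pat p part pat.length hm le_rfl).mp
                  (by rwa [List.take_length])
                rw [hm1] at h
                exact hp0 (by simpa using h.2)
              rw [ih (p ++ [part]) _ ?_]
              · exact shift_iff pat p part rest hnot
              · intro j'
                constructor
                · intro hj'
                  simp only [List.mem_map, List.mem_filter] at hj'
                  obtain ⟨j0, hj0, -⟩ := hj'
                  have := (hinv j0).mp hj0.1
                  omega
                · rintro ⟨ha, hb, -⟩
                  omega
          · -- pattern of length ≥ 2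
            have hm2 : 2 ≤ pat.length := by omega
            have hnot : ¬ pat <:+ p ++ [part] := by
              intro hfull
              have h := (take_suffix_concat pat p part pat.length hm le_rfl).mp
                (by rwa [List.take_length])
              have hj : pat.length - 1 ∈ active :=
                (hinv (pat.length - 1)).mpr ⟨by omega, by omega, h.1⟩
              exact hfound' _ hj h.2 (by omega)
            have hstep := inv_step pat p part active hinv hfound'
            by_cases hp0 : pat.getD 0 "" = part
            · rw [if_pos hp0, if_neg hm1]
              rw [ih (p ++ [part]) _ ?_]
              · exact shift_iff pat p part rest hnot
              · intro j'
                simp only [List.mem_append, List.mem_singleton]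
                rcases j' with _ | _ | j
                · constructor
                  · rintro (h | h)
                    · simp only [List.mem_map, List.mem_filter] at h
                      obtain ⟨j0, -, he⟩ := h
                      omega
                    · omega
                  · rintro ⟨ha, -, -⟩; omega
                · constructor
                  · intro _
                    refine ⟨le_refl 1, by omega, ?_⟩
                    exact (take_suffix_concat pat p part 1 le_rfl (by omega)).mpr
                      ⟨by simp, by simpa using hp0⟩
                  · intro _; right; rfl
                · rw [iff_false_intro (show ¬ (j + 1 + 1 = 1) from by omega)]
                  rw [hstep (j + 1 + 1) (by omega)]
                  constructor
                  · rintro (h | h)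
                    · exact ⟨by omega, h.1, h.2⟩
                    · exact h.elim
                  · rintro ⟨-, hb, hc⟩; exact Or.inl ⟨hb, hc⟩
            · rw [if_neg hp0]
              rw [ih (p ++ [part]) _ ?_]
              · exact shift_iff pat p part rest hnot
              · intro j'
                rcases j' with _ | _ | j
                · constructor
                  · intro h
                    simp only [List.mem_map, List.mem_filter] at h
                    obtain ⟨j0, -, he⟩ := h
                    omega
                  · rintro ⟨ha, -, -⟩; omega
                · constructor
                  · intro h
                    simp only [List.mem_map, List.mem_filter] at h
                    obtain ⟨j0, hj0, he⟩ := h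
                    have := (hinv j0).mp hj0.1
                    omega
                  · rintro ⟨-, -, hc⟩
                    have h := (take_suffix_concat pat p part 1 le_rfl (by omega)).mp hc
                    exact absurd (by simpa using h.2) hp0
                · rw [hstep (j + 1 + 1) (by omega)]
                  constructor
                  · rintro ⟨ha, hb⟩; exact ⟨by omega, ha, hb⟩
                  · rintro ⟨-, hb, hc⟩; exact ⟨hb, hc⟩

theorem B_iff (src pat : List String) :
    path_has_subpath_alt src pat = true ↔
      pat ≠ [] ∧ ∃ i, 1 ≤ i ∧ i ≤ src.length ∧ pat <:+ src.take i := by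
  rw [show path_has_subpath_alt src pat =
        (if pat.length = 0 then false else pvOuterB pat pat.length src []) from rfl]
  split_ifs with h0
  · refine iff_of_false (by simp) ?_
    rintro ⟨hne, -⟩
    exact hne (List.eq_nil_of_length_eq_zero h0)
  · have hm : 1 ≤ pat.length := by omega
    rw [outerB_iff pat hm src [] [] ?_]
    · constructor
      · rintro ⟨i, h1, h2, h3⟩
        exact ⟨List.ne_nil_of_length_pos (by omega), i, h1, h2, by simpa using h3⟩
      · rintro ⟨-, i, h1, h2, h3⟩
        exact ⟨i, h1, h2, by simpa using h3⟩
    · intro j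
      constructor
      · intro h; cases h
      · rintro ⟨h1, h2, h3⟩
        have h4 : pat.take j = [] := List.eq_nil_of_suffix_nil h3
        have h5 : (pat.take j).length = 0 := by rw [h4]; rfl
        rw [List.length_take] at h5
        omega

theorem specs_agree (src pat : List String) (hne : pat ≠ []) :
    (∃ i, 1 ≤ i ∧ i ≤ src.length ∧ pat <:+ src.take i) ↔
      (∃ k : Nat, k + pat.length ≤ src.length ∧ (src.drop k).take pat.length = pat) := by
  constructor
  · rintro ⟨i, h1, h2, u, hu⟩
    have hlen : u.length + pat.length = i := by
      have h := congrArg List.length hu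
      simp [List.length_take] at h
      omega
    refine ⟨u.length, by omega, ?_⟩
    calc (src.drop u.length).take pat.length
        = ((src.take (u.length + pat.length)).drop u.length) := by
          rw [List.drop_take]; congr 1; omega
      _ = (src.take i).drop u.length := by rw [hlen]
      _ = (u ++ pat).drop u.length := by rw [← hu]
      _ = pat := by simp
  · rintro ⟨k, hk, he⟩
    have hp : 0 < pat.length := List.length_pos_iff.mpr hne
    refine ⟨k + pat.length, by omega, hk, ?_⟩
    rw [List.take_add, he]
    exact List.suffix_append _ _

-- ===== VERDICT (by name: the statement is the Claim_ definition above) =====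
theorem path_has_subpath_spec : Claim_equal_path_has_subpath := by
  intro src pat _
  unfold Spec_path_has_subpath
  rw [Bool.eq_iff_iff, A_iff, B_iff]
  constructor
  · rintro ⟨h1, h2⟩
    exact ⟨h1, (specs_agree src pat h1).mpr h2⟩
  · rintro ⟨h1, h2⟩
    exact ⟨h1, (specs_agree src pat h1).mp h2⟩
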